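-- pv_equiv track=rewrite | github.com/SamSwaroop/Competitive-Programmig---Elective-3 | isAdditivePrime/isAdditivePrime.py | isAdditivePrime
-- ===== SOURCE A (Python) =====
-- def isPrime(n):
--     if (n < 2):
--         return False
--     for factor in range(2,n):
--         if (n % factor == 0):
--             return False
--     return True
--
-- def addition(x):
--     sum=0
--     while(x!=0):
--         f=x%10
--         sum=sum+f
--         x=x//10
--     return sum
--
-- def isAdditivePrime(n):
--     n=str(n)
--     while(len(n)!=1):
--         n=int(n)
--         d=addition(n)
--         n=str(d)
--
--     if(isPrime(int(n))):
--         return True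
--     else:
--         return False
-- ===== SOURCE B (Python) =====
-- def isAdditivePrime(n):
--     dr = 0 if n == 0 else 1 + (n - 1) % 9
--     return dr in (2, 3, 5, 7)
-- ===== Notes on version B (the rewrite author's own statement) =====
-- stated objective: simpler
-- what changed: B replaces A's repeated string/int round-trips with digit-sum loops plus a trial-division primality test by the closed-form digital root 1 + (n-1) % 9 and a membership test among the single-digit primes.
-- outside the precondition, e.g. on isAdditivePrime(-5): A does not finish within the time limit, B returns False
import Mathlib
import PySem

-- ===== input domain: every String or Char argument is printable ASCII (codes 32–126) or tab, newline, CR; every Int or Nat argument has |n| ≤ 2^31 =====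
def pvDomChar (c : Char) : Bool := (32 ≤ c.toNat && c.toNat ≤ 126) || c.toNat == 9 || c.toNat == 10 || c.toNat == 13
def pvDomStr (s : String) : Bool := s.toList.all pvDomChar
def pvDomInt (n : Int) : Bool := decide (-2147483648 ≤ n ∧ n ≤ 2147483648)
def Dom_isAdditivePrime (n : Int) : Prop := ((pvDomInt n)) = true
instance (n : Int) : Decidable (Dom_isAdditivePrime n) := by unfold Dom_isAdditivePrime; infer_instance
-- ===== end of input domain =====

-- B replaces A's repeated string-based digit-summing loop and trial-division primality
-- test by the closed-form digital root 1 + (n-1) % 9 and a membership test in {2,3,5,7}.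

-- ===== PORT A =====
-- isPrime(n): trial division over range(2, n)
def isPrimeA (n : Int) : Bool :=
  if n < 2 then false
  else (PySem.List.pyRange 2 n 1).all (fun factor => !(PySem.Int.mod n factor == 0))

-- addition(x): while x != 0: sum += x % 10; x //= 10.  Fuel makes the loop total in
-- Lean: for 0 ≤ x, x.natAbs + 1 iterations always suffice (x // 10 < x); for x < 0 the
-- Python loop never terminates — those inputs are outside Pre_.
def additionLoop : Nat → Int → Int → Int
  | 0, _, sum => sum
  | fuel + 1, x, sum =>
    if x == 0 then sum
    else additionLoop fuel (PySem.Int.floordiv x 10) (sum + PySem.Int.mod x 10)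

def additionA (x : Int) : Int := additionLoop (x.natAbs + 1) x 0

-- main loop of A: n = str(n); while len(n) != 1: n = str(addition(int(n))).
-- The state is kept as the integer the string denotes (int(str(m)) = m for an int m),
-- and the loop condition tests the length of str(m) exactly as A does.  Fuel: for
-- 0 ≤ m the digit sum strictly decreases past 10, so natAbs + 1 steps suffice.
def mainLoopA : Nat → Int → Int
  | 0, m => m
  | fuel + 1, m =>
    if (PySem.Int.toChars m).length == 1 then m
    else mainLoopA fuel (additionA m)

def isAdditivePrime (n : Int) : Bool :=
  if isPrimeA (mainLoopA (n.natAbs + 1) n) then true else false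

-- ===== PORT B =====
def isAdditivePrime_alt (n : Int) : Bool :=
  let dr : Int := if n == 0 then 0 else 1 + PySem.Int.mod (n - 1) 9
  dr == 2 || dr == 3 || dr == 5 || dr == 7

-- ===== PRECONDITION & SPEC =====
-- A's addition() loops forever on negative n (x // 10 stalls at -1), so A never returns there.
def Pre_isAdditivePrime (n : Int) : Prop := 0 ≤ n
instance (n : Int) : Decidable (Pre_isAdditivePrime n) := by unfold Pre_isAdditivePrime; infer_instance
def pvWitness_isAdditivePrime : Int := (29)

def Spec_isAdditivePrime (n : Int) (out : Bool) : Prop := out = isAdditivePrime_alt n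
instance (n : Int) (out : Bool) : Decidable (Spec_isAdditivePrime n out) := by unfold Spec_isAdditivePrime; infer_instance

-- ===== CLAIM (what is proved, stated in full; the proofs are below) =====
def Claim_equal_isAdditivePrime : Prop := ∀ (n : Int), Dom_isAdditivePrime n → Pre_isAdditivePrime n → Spec_isAdditivePrime n (isAdditivePrime n)

-- ===== LEMMAS AND PROOFS =====

-- mathematical digit sum
def dsum : Nat → Nat
  | 0 => 0
  | m + 1 => (m + 1) % 10 + dsum ((m + 1) / 10)
decreasing_by exact Nat.div_lt_self (Nat.succ_pos m) (by omega)

lemma dsum_zero : dsum 0 = 0 := by rw [dsum]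

lemma dsum_pos_eq (m : Nat) (h : 0 < m) : dsum m = m % 10 + dsum (m / 10) := by
  cases m with
  | zero => omega
  | succ k => rw [dsum]

lemma additionLoop_eq (fuel : Nat) : ∀ (m s : Nat), m ≤ fuel →
    additionLoop fuel (m : Int) (s : Int) = ((s + dsum m : Nat) : Int) := by
  induction fuel with
  | zero => intro m s h; interval_cases m; simp [additionLoop, dsum_zero]
  | succ f ih =>
    intro m s h
    by_cases hm : m = 0
    · subst hm; simp [additionLoop, dsum_zero]
    · rw [additionLoop, if_neg (show ¬ (((m : Int) == 0) = true) by simp [hm])]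
      rw [show PySem.Int.floordiv (m : Int) 10 = ((m / 10 : Nat) : Int) by exact_mod_cast PySem.Int.floordiv_natCast m 10]
      rw [show PySem.Int.mod (m : Int) 10 = ((m % 10 : Nat) : Int) by exact_mod_cast PySem.Int.mod_natCast m 10]
      rw [show ((s : Int) + ((m % 10 : Nat) : Int)) = ((s + m % 10 : Nat) : Int) by push_cast; ring]
      rw [ih (m / 10) (s + m % 10) (by omega)]
      rw [dsum_pos_eq m (Nat.pos_of_ne_zero hm)]
      push_cast; ring

lemma additionA_eq (m : Nat) : additionA (m : Int) = ((dsum m : Nat) : Int) := by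
  unfold additionA
  rw [show ((m : Int).natAbs) = m by simp]
  have h := additionLoop_eq (m + 1) m 0 (by omega)
  simpa using h

lemma dsum_mod9 (m : Nat) : dsum m % 9 = m % 9 := by
  induction m using Nat.strong_induction_on with
  | _ m ih =>
    cases m with
    | zero => simp [dsum_zero]
    | succ k =>
      rw [dsum_pos_eq (k + 1) (Nat.succ_pos k)]
      have := ih ((k + 1) / 10) (Nat.div_lt_self (Nat.succ_pos k) (by omega))
      omega

lemma dsum_lt (m : Nat) (h : 10 ≤ m) : dsum m < m := by
  induction m using Nat.strong_induction_on with
  | _ m ih =>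
    rw [dsum_pos_eq m (by omega)]
    by_cases h10 : 10 ≤ m / 10
    · have := ih (m / 10) (Nat.div_lt_self (by omega) (by omega)) h10
      omega
    · have hd : dsum (m / 10) ≤ m / 10 := by
        rcases Nat.eq_zero_or_pos (m / 10) with h0 | hp
        · rw [h0]; simp [dsum_zero]
        · rw [dsum_pos_eq _ hp]
          have : (m / 10) / 10 = 0 := Nat.div_eq_of_lt (by omega)
          rw [this]; simp [dsum_zero]; omega
      omega

lemma dsum_pos (m : Nat) (h : 0 < m) : 0 < dsum m := by
  induction m using Nat.strong_induction_on with
  | _ m ih =>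
    rw [dsum_pos_eq m h]
    by_cases h10 : m % 10 = 0
    · have hp : 0 < m / 10 := by omega
      have := ih (m / 10) (Nat.div_lt_self h (by omega)) hp
      omega
    · omega

-- length of toDigitsCore with a nonempty accumulator
lemma toDigitsCore_lens_add (b f n : Nat) : ∀ l : List Char,
    (Nat.toDigitsCore b f n l).length = (Nat.toDigitsCore b f n []).length + l.length := by
  intro l
  induction l with
  | nil => simp
  | cons c tl ih =>
    rw [Nat.toDigitsCore_lens_eq b f n c tl, ih]
    simp
    omega

lemma toDigitsCore_len_pos (b f n : Nat) : 1 ≤ (Nat.toDigitsCore b (f + 1) n []).length := by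
  rw [Nat.toDigitsCore]
  split
  · simp
  · rw [toDigitsCore_lens_add]
    simp

lemma toChars_len_one (m : Nat) : ((PySem.Int.toChars (m : Int)).length = 1) ↔ m < 10 := by
  have hnn : ¬ ((m : Int) < 0) := by omega
  unfold PySem.Int.toChars
  rw [if_neg hnn, Int.toNat_natCast]
  unfold Nat.toDigits
  constructor
  · intro h
    by_contra h10
    rw [Nat.toDigitsCore] at h
    have hdiv : ¬ (m / 10 = 0) := by
      have : 1 ≤ m / 10 := Nat.one_le_div_iff (by omega) |>.mpr (by omega)
      omega
    rw [if_neg hdiv] at h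
    rw [toDigitsCore_lens_add, List.length_singleton] at h
    have h1 := toDigitsCore_len_pos 10 (m - 1) (m / 10)
    rw [Nat.sub_add_cancel (by omega)] at h1
    omega
  · intro h
    rw [Nat.toDigitsCore, if_pos (Nat.div_eq_of_lt h)]
    simp

-- the digital root, closed form on Nat
def droot (m : Nat) : Nat := if m = 0 then 0 else 1 + (m - 1) % 9

-- the single-digit-prime membership test, as B computes it
def memB (d : Nat) : Bool := d == 2 || d == 3 || d == 5 || d == 7

lemma droot_of_lt_ten (m : Nat) (h : m < 10) : droot m = m := by
  unfold droot; split_ifs with h0 <;> omega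

lemma droot_dsum (m : Nat) (h : 10 ≤ m) : droot (dsum m) = droot m := by
  have h1 : dsum m % 9 = m % 9 := dsum_mod9 m
  have h2 : 0 < dsum m := dsum_pos m (by omega)
  unfold droot
  rw [if_neg (by omega), if_neg (by omega)]
  omega

lemma mainLoopA_eq (fuel : Nat) : ∀ (m : Nat), m < fuel →
    mainLoopA fuel (m : Int) = ((droot m : Nat) : Int) := by
  induction fuel with
  | zero => intro m h; omega
  | succ f ih =>
    intro m h
    rw [mainLoopA]
    by_cases h10 : m < 10
    · rw [if_pos (by simpa [toChars_len_one] using h10), droot_of_lt_ten m h10]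
    · rw [if_neg (by simpa [toChars_len_one] using h10)]
      rw [additionA_eq m, ih (dsum m) (by have := dsum_lt m (by omega); omega)]
      rw [droot_dsum m (by omega)]

lemma droot_le_nine (m : Nat) : droot m ≤ 9 := by
  unfold droot; split_ifs with h
  · omega
  · have : (m - 1) % 9 < 9 := Nat.mod_lt _ (by omega)
    omega

lemma alt_eq (m : Nat) : isAdditivePrime_alt (m : Int) = memB (droot m) := by
  by_cases h0 : m = 0
  · subst h0; decide
  · unfold isAdditivePrime_alt droot memB
    rw [if_neg (show ¬ (((m : Int) == 0) = true) by simp [h0]), if_neg h0]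
    rw [show ((m : Int) - 1) = ((m - 1 : Nat) : Int) by omega]
    rw [show PySem.Int.mod ((m - 1 : Nat) : Int) 9 = (((m - 1) % 9 : Nat) : Int) by
      exact_mod_cast PySem.Int.mod_natCast (m - 1) 9]
    have hlt : (m - 1) % 9 < 9 := Nat.mod_lt _ (by omega)
    set r := (m - 1) % 9 with hr
    clear_value r
    interval_cases r <;> decide

lemma isPrimeA_droot (m : Nat) :
    isPrimeA ((droot m : Nat) : Int) = memB (droot m) := by
  have h9 := droot_le_nine m
  set d := droot m with hd
  clear_value d
  interval_cases d <;> decide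

-- ===== VERDICT (by name: the statement is the Claim_ definition above) =====
theorem isAdditivePrime_spec : Claim_equal_isAdditivePrime := by
  intro n _ hpre
  unfold Pre_isAdditivePrime at hpre
  unfold Spec_isAdditivePrime
  obtain ⟨m, rfl⟩ : ∃ m : Nat, n = (m : Int) := ⟨n.toNat, by omega⟩
  unfold isAdditivePrime
  rw [show ((m : Int).natAbs) = m by simp]
  rw [mainLoopA_eq (m + 1) m (by omega)]
  simp only [show ∀ b : Bool, (if b = true then true else false) = b from fun b => by cases b <;> rfl]
  rw [isPrimeA_droot m, alt_eq m]
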